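-- pv_equiv track=rewrite | github.com/d4rt/aoc | aoc2019/4.py | adjacent2
-- ===== SOURCE A (Python) =====
-- def adjacent2(pw: str) -> bool:
--     for i, c in enumerate(pw[:-1]):
--         pair = c == pw[i + 1]
--         if pair:
--             if i != 0:
--                 pair = pair and (pw[i - 1] != c)
--             if (i + 2) <= len(pw) - 1:
--                 pair = pair and (pw[i + 2] != c)
--             if pair:
--                 return True
--     return False
-- ===== SOURCE B (Python) =====
-- def adjacent2(pw: str) -> bool:
--     # run-length decomposition: split pw into maximal runs, True iff some run has length exactly 2
--     runs = []
--     cur = 0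
--     prev = None
--     for c in pw:
--         if c == prev:
--             cur += 1
--         else:
--             if cur != 0:
--                 runs.append(cur)
--             cur = 1
--             prev = c
--     if cur != 0:
--         runs.append(cur)
--     return any(r == 2 for r in runs)
-- ===== Notes on version B (the rewrite author's own statement) =====
-- stated objective: alternative
-- what changed: B decomposes the string into maximal runs of equal characters (one pass with a run-length accumulator) and returns True iff some run length is exactly 2, instead of A's per-index window check that indexes pw[i-1], pw[i+1], pw[i+2] for every position.
import Mathlib
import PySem

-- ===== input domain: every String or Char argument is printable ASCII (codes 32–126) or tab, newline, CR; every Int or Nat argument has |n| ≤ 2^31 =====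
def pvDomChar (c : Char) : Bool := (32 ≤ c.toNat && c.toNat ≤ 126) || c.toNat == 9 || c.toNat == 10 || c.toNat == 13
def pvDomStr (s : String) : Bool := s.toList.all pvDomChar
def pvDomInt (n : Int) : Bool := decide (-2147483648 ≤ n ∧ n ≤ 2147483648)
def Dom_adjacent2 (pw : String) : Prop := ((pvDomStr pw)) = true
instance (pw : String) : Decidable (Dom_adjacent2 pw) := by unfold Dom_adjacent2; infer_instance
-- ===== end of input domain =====

-- B re-implements A by maximal-run decomposition instead of per-index neighbour checks (same O(n); a timing run measured a lower constant).

-- ===== PORT A =====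
-- A's loop `for i, c in enumerate(pw[:-1])` with lookups pw[i-1], pw[i+1], pw[i+2] is the
-- sliding window (prev, c, c1, rest.head?): prev = none encodes i = 0, rest.head? = none
-- encodes i + 2 > len(pw) - 1, so the two guarded `pair and …` conjuncts become the
-- option-inequalities below; `return True` is the `then true`, and falling through to the
-- next index is the recursive call with prev := some c.
def adjacent2Go (prev : Option Char) : List Char → Bool
  | c :: c1 :: rest =>
      if c = c1 ∧ prev ≠ some c ∧ rest.head? ≠ some c then true
      else adjacent2Go (some c) (c1 :: rest)
  | _ => false

def adjacent2 (pw : String) : Bool := adjacent2Go none pw.toList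

-- ===== PORT B =====
-- Source B: one foldl maintaining (runs, cur, prev); finalize appends the last run; any run == 2.
def adjacent2_alt (pw : String) : Bool :=
  let st := pw.toList.foldl
    (fun (s : List Nat × Nat × Option Char) c =>
      if some c = s.2.2 then (s.1, s.2.1 + 1, s.2.2)
      else ((if s.2.1 ≠ 0 then s.1 ++ [s.2.1] else s.1), 1, some c))
    ([], 0, none)
  let runs := if st.2.1 ≠ 0 then st.1 ++ [st.2.1] else st.1
  runs.any (fun r => r == 2)

-- ===== PRECONDITION & SPEC =====
def Spec_adjacent2 (pw : String) (out : Bool) : Prop := out = adjacent2_alt pw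
instance (pw : String) (out : Bool) : Decidable (Spec_adjacent2 pw out) := by unfold Spec_adjacent2; infer_instance

-- ===== CLAIM (what is proved, stated in full; the proofs are below) =====
def Claim_equal_adjacent2 : Prop := ∀ (pw : String), Dom_adjacent2 pw → Spec_adjacent2 pw (adjacent2 pw)

-- ===== LEMMAS AND PROOFS =====

-- proof-side characterisation of B's tail computation: currently inside a run of `c` of length `cur`
def runScan (c : Char) (cur : Nat) : List Char → Bool
  | [] => cur == 2
  | d :: t => if d = c then runScan c (cur + 1) t else (cur == 2) || runScan d 1 t

-- named copies of B's fold step and finaliser (definitionally equal to the inline ones)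
def stepB (s : List Nat × Nat × Option Char) (c : Char) : List Nat × Nat × Option Char :=
  if some c = s.2.2 then (s.1, s.2.1 + 1, s.2.2)
  else ((if s.2.1 ≠ 0 then s.1 ++ [s.2.1] else s.1), 1, some c)

def finB (st : List Nat × Nat × Option Char) : Bool :=
  (if st.2.1 ≠ 0 then st.1 ++ [st.2.1] else st.1).any (fun r => r == 2)

lemma adjacent2_alt_eq (pw : String) :
    adjacent2_alt pw = finB (pw.toList.foldl stepB ([], 0, none)) := rfl

lemma adjacent2_alt_fold (l : List Char) :
    ∀ (runs : List Nat) (cur : Nat) (c : Char), 1 ≤ cur →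
    finB (l.foldl stepB (runs, cur, some c))
      = (runs.any (fun r => r == 2) || runScan c cur l) := by
  induction l with
  | nil =>
      intro runs cur c hcur
      have hz : cur ≠ 0 := by omega
      simp [List.foldl, finB, runScan, hz, List.any_append]
  | cons d t ih =>
      intro runs cur c hcur
      by_cases hdc : d = c
      · subst hdc
        have hstep : stepB (runs, cur, some d) d = (runs, cur + 1, some d) := by
          simp [stepB]
        rw [List.foldl_cons, hstep, ih runs (cur + 1) d (by omega)]
        simp [runScan]
      · have hz : cur ≠ 0 := by omega
        have hstep : stepB (runs, cur, some c) d = (runs ++ [cur], 1, some d) := by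
          simp [stepB, hz]
          exact fun h => hdc h
        rw [List.foldl_cons, hstep, ih (runs ++ [cur]) 1 d (by omega)]
        simp [runScan, hdc, List.any_append, Bool.or_assoc]

-- runScan is insensitive to the exact length once the current run already has ≥ 3 elements
lemma runScan_ge3 (l : List Char) :
    ∀ (c : Char) (cur₁ cur₂ : Nat), 3 ≤ cur₁ → 3 ≤ cur₂ →
    runScan c cur₁ l = runScan c cur₂ l := by
  induction l with
  | nil =>
      intro c cur₁ cur₂ h1 h2
      simp [runScan]; omega
  | cons d t ih =>
      intro c cur₁ cur₂ h1 h2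
      by_cases hdc : d = c
      · subst hdc
        simp [runScan, ih d (cur₁ + 1) (cur₂ + 1) (by omega) (by omega)]
      · have e1 : (cur₁ == 2) = false := by simp; omega
        have e2 : (cur₂ == 2) = false := by simp; omega
        simp [runScan, hdc, e1, e2]

-- main bridge: A's window scan equals the run-length scan (strong induction on the length)
lemma adjacent2Go_runScan : ∀ (n : Nat) (t : List Char), t.length ≤ n →
    (∀ (c : Char) (p : Option Char), p ≠ some c →
        adjacent2Go p (c :: t) = runScan c 1 t)
    ∧ (∀ (c : Char), adjacent2Go (some c) (c :: t) = runScan c 3 t) := by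
  intro n
  induction n with
  | zero =>
      intro t ht
      have : t = [] := List.eq_nil_of_length_eq_zero (by omega)
      subst this
      constructor
      · intro c p hp; simp [adjacent2Go, runScan]
      · intro c; simp [adjacent2Go, runScan]
  | succ n ihn =>
      intro t ht
      cases t with
      | nil =>
          constructor
          · intro c p hp; simp [adjacent2Go, runScan]
          · intro c; simp [adjacent2Go, runScan]
      | cons c1 t' =>
          have ih := ihn t' (by simpa using Nat.lt_succ_iff.mp (by simpa using ht))
          constructor
          · intro c p hp
            by_cases h1 : c1 = c
            · subst h1
              cases t' with
              | nil =>
                  simp [adjacent2Go, runScan, hp]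
              | cons c2 t'' =>
                  by_cases h2 : c2 = c1
                  · subst h2
                    have ih'' := ihn t'' (by simp at ht ⊢; omega)
                    have h3 := ih''.2 c2
                    have h6 := runScan_ge3 t'' c2 4 3 (by omega) (by omega)
                    simp [adjacent2Go, runScan, hp, h3]
                  · have h2' : ¬ c1 = c2 := fun h => h2 h.symm
                    simp [adjacent2Go, runScan, hp, h2]
            · have h1' : ¬ c = c1 := fun h => h1 h.symm
              have hrec := ih.1 c1 (some c) (by simpa using h1')
              simp [adjacent2Go, runScan, h1, h1', hrec]
          · intro c
            by_cases h1 : c1 = c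
            · subst h1
              have h3 := ih.2 c1
              have h6 := runScan_ge3 t' c1 4 3 (by omega) (by omega)
              simp [adjacent2Go, runScan, h3, h6]
            · have h1' : ¬ c = c1 := fun h => h1 h.symm
              have hrec := ih.1 c1 (some c) (by simpa using h1')
              simp [adjacent2Go, runScan, h1, h1', hrec]

-- ===== VERDICT (by name: the statement is the Claim_ definition above) =====
theorem adjacent2_spec : Claim_equal_adjacent2 := by
  intro pw _
  unfold Spec_adjacent2 adjacent2
  rw [adjacent2_alt_eq]
  cases hl : pw.toList with
  | nil => simp [adjacent2Go, finB]
  | cons c t =>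
      have hA := (adjacent2Go_runScan t.length t le_rfl).1 c none (by simp)
      have hstep : stepB ([], 0, none) c = ([], 1, some c) := by simp [stepB]
      rw [List.foldl_cons, hstep, adjacent2_alt_fold t [] 1 c (by omega)]
      simpa using hA
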